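-- pv_equiv track=rewrite | github.com/YaaYaa23/SROM | 3/lab_3/lab3.py | mull_pol
-- ===== SOURCE A (Python) =====
-- def equal_length(A, B):
--     delta = len(A) - len(B)
--     if delta > 0:
--         B.extend([0] * delta)
--     elif delta < 0:
--         A.extend([0] * abs(delta))
--     return A, B
--
-- def pop_null(number):
--     while number and number[-1] == 0:
--         number.pop()
--     return number if number else [0]
--
-- def sub_pol(A, B):
--     A, B = equal_length(A, B)
--     result = [(a - b) % 2 for a, b in zip(A, B)]
--     return mod_pol(result)
--
-- def mull_pol(A, B):
--     if A == 0 or B == 0: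
--         return 0
--     A, B = equal_length(A, B)
--     result = [0] * (2 * len(A))
--     for i, a in enumerate(A):
--         if a == 0:
--             continue
--         for j, b in enumerate(B):
--             if b == 0:
--                 continue
--             result[i + j] = (result[i + j] + a * b) % 2
--     return mod_pol(result)
--
-- def mod_pol(number):
--     ourMod = [0] * 192
--     ourMod[191], ourMod[9], ourMod[0] = 1, 1, 1
--     _, remainder = div_pol(number, ourMod)
--     return remainder
--
-- def div_pol(A, B):
--     A = pop_null(A)
--     compare = cmp(A, B)
--     if compare == 0:
--         return [0], [0]
--     if compare == -1:
--         return [0], A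
--
--     k = len(B)
--     r = A.copy()
--     q = [0] * len(A)
--
--     while cmp(r, B) != -1:
--         t = len(r)
--         c = append_null(B, t - k)
--         r = sub_pol(r, c)
--         q[t - k] = 1
--
--     q = pop_null(q)
--     r = pop_null(r)
--     return q, r
--
-- def cmp(A, B):
--     A = pop_null(A)
--     B = pop_null(B)
--
--     if A != 0:
--         lenA = len(A)
--     else:
--         lenA = 0
--
--     if B != 0:
--         lenB = len(B)
--     else:
--         lenB = 0
--
--     if lenA > lenB:
--         return 1
--     elif lenA < lenB:
--         return -1
--     else:
--         for i in range(len(A) - 1, -1, -1):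
--             if A[i] == B[i]:
--                 pass
--             elif A[i] > B[i]:
--                 return 1
--             else:
--                 return -1
--
--     return 0
--
-- def append_null(array, k):
--     return [0] * k + array
-- ===== SOURCE B (Python) =====
-- # Big-integer re-implementation: pack coefficients mod 2 into one int, do a
-- # carry-less shift/XOR multiply (with a zero-product fast path), reduce against
-- # the fixed modulus by XORing a shifted copy of it, and unpack the bits.
-- # (A also mutates its argument lists in place via equal_length; the equivalence
-- # is about the return value only -- B does not mutate.)
-- _M = (1 << 191) | (1 << 9) | 1
--
-- def mull_pol(A, B):
--     x = 0
--     for i, a in enumerate(A):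
--         x |= (a % 2) << i
--     y = 0
--     for j, b in enumerate(B):
--         y |= (b % 2) << j
--     p = 0
--     while x:
--         if x & 1:
--             p ^= y
--         y <<= 1
--         x >>= 1
--     if p == 0:
--         return []
--     while p >= _M:
--         p ^= _M << (p.bit_length() - 192)
--     out = []
--     while p:
--         out.append(p & 1)
--         p >>= 1
--     return out if out else [0]
-- ===== Notes on version B (the rewrite author's own statement) =====
-- stated objective: faster
-- what changed: Replaces the coefficient-list schoolbook multiply and the mutually recursive list-based long-division reduction (sub_pol/mod_pol/div_pol/cmp) with big integers: coefficients are packed into one int, multiplied carry-lessly by shift/XOR (empty list for a zero product, as A returns), reduced by XORing shifted copies of the fixed modulus x^191+x^9+1, and unpacked.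
import Mathlib
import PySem

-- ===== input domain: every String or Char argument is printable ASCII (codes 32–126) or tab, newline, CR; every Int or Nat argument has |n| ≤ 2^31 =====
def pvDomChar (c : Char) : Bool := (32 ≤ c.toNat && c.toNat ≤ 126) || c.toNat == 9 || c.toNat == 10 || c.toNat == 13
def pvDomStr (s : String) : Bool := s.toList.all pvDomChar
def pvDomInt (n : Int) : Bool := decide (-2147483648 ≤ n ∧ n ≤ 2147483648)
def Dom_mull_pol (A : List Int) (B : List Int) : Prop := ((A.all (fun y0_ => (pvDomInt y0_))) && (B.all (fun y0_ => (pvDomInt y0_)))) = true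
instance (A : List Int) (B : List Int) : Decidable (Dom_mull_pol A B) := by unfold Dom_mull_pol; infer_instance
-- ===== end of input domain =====

-- B packs the coefficients mod 2 into a single natural number, multiplies carry-lessly by
-- shift/XOR and reduces by XORing shifted copies of the fixed modulus, instead of A's
-- coefficient-list schoolbook multiply and mutually recursive list long division (faster by
-- a constant factor; A also extends its argument lists in place via equal_length — the
-- equivalence proved here is about the return value only, B does not mutate its arguments).

-- ===== PORT A =====

-- 'while number and number[-1] == 0: number.pop()' : drop trailing zeros
def pvPnAux : List Int → List Int
  | [] => []
  | a :: l =>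
    match pvPnAux l with
    | [] => if a = 0 then [] else [a]
    | r => a :: r

-- pop_null: 'return number if number else [0]'
def pvPopNull (l : List Int) : List Int :=
  match pvPnAux l with
  | [] => [0]
  | r => r

-- equal_length (return value; the Python extends A or B in place)
def pvEqualLength (A B : List Int) : List Int × List Int :=
  let delta : Int := (A.length : Int) - (B.length : Int)
  if delta > 0 then (A, B ++ List.replicate delta.toNat 0)
  else if delta < 0 then (A ++ List.replicate (-delta).toNat 0, B)
  else (A, B)

-- cmp's 'for i in range(len(A)-1, -1, -1)' loop on equal-length lists: the first difference
-- from the top index decides (the tail holds the higher indices, so it is consulted first)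
def pvCmpHigh : List Int → List Int → Int
  | a :: l1, b :: l2 =>
    let t := pvCmpHigh l1 l2
    if t = 0 then (if a = b then 0 else if a > b then 1 else -1) else t
  | _, _ => 0

def pvCmp (A B : List Int) : Int :=
  let A' := pvPopNull A
  let B' := pvPopNull B
  -- 'if A != 0' / 'if B != 0' compare a list with the int 0: always True in Python
  let lenA := A'.length
  let lenB := B'.length
  if lenA > lenB then 1
  else if lenA < lenB then -1
  else pvCmpHigh A' B'

def pvAppendNull (array : List Int) (k : Nat) : List Int := List.replicate k 0 ++ array

-- ourMod = [0]*192 with indices 191, 9, 0 set to 1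
def pvOurMod : List Int := (((List.replicate 192 (0 : Int)).set 191 1).set 9 1).set 0 1

-- div_pol / its while loop / sub_pol / mod_pol: mutually recursive in Python; the fuel
-- parameter (structural recursion) makes the same computation total — mull_pol supplies
-- more fuel than the recursion can consume, so the fuel-0 defaults are never reached
mutual
def pvDivPol : Nat → List Int → List Int → List Int × List Int
  | 0, _, _ => ([0], [0])
  | fuel + 1, A, B =>
    let A' := pvPopNull A
    let compare := pvCmp A' B
    if compare = 0 then ([0], [0])
    else if compare = -1 then
      -- cmp's pop_null popped div_pol's local A in place: a zero polynomial [0] became []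
      ([0], pvPnAux A')
    else
      pvDivLoop fuel A' (List.replicate A'.length 0) B B.length

def pvDivLoop : Nat → List Int → List Int → List Int → Nat → List Int × List Int
  | 0, r, q, _, _ => (pvPopNull q, pvPopNull r)
  | fuel + 1, r, q, B, k =>
    if pvCmp r B ≠ -1 then
      let t := r.length
      let c := pvAppendNull B (t - k)
      let r' := pvSubPol fuel r c
      let q' := q.set (t - k) 1
      pvDivLoop fuel r' q' B k
    else (pvPopNull q, pvPopNull r)

def pvSubPol : Nat → List Int → List Int → List Int
  | 0, _, _ => []
  | fuel + 1, A, B =>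
    let p := pvEqualLength A B
    pvModPol fuel (List.zipWith (fun a b => (a - b).emod 2) p.1 p.2)

def pvModPol : Nat → List Int → List Int
  | 0, _ => []
  | fuel + 1, number => (pvDivPol fuel number pvOurMod).2
end

def mull_pol (A : List Int) (B : List Int) : List Int :=
  -- 'if A == 0 or B == 0: return 0' compares a list with the int 0: always False in Python
  let p := pvEqualLength A B
  let A' := p.1
  let B' := p.2
  let result0 := List.replicate (2 * A'.length) (0 : Int)
  let result := (A'.zipIdx).foldl (fun res ai =>
    if ai.1 = 0 then res
    else (B'.zipIdx).foldl (fun res bj =>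
      if bj.1 = 0 then res
      else res.set (ai.2 + bj.2) ((res.getD (ai.2 + bj.2) 0 + ai.1 * bj.1).emod 2)) res) result0
  pvModPol (8 * result.length + 8) result

-- ===== PORT B =====

def pvM : Nat := (1 <<< 191) ||| (1 <<< 9) ||| 1

-- 'while x: if x & 1: p ^= y; y <<= 1; x >>= 1'   (fuel = initial x bounds the iterations)
def pvClmulLoop : Nat → Nat → Nat → Nat → Nat
  | 0, p, _, _ => p
  | fuel + 1, p, y, x =>
    if x = 0 then p
    else pvClmulLoop fuel (if x % 2 = 1 then p ^^^ y else p) (y <<< 1) (x >>> 1)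

-- 'while p >= _M: p ^= _M << (p.bit_length() - 192)'   (fuel = initial p bounds the iterations)
def pvRedLoop : Nat → Nat → Nat
  | 0, p => p
  | fuel + 1, p =>
    if pvM ≤ p then pvRedLoop fuel (p ^^^ (pvM <<< (PySem.Int.bitLength (p : Int) - 192)))
    else p

-- 'while p: out.append(p & 1); p >>= 1'   (fuel = initial p bounds the iterations)
def pvBitsLoop : Nat → Nat → List Int
  | 0, _ => []
  | fuel + 1, p => if p = 0 then [] else ((p % 2 : Nat) : Int) :: pvBitsLoop fuel (p / 2)

def mull_pol_alt (A : List Int) (B : List Int) : List Int :=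
  let x := (A.zipIdx).foldl (fun acc ai => acc ||| ((ai.1.emod 2).toNat <<< ai.2)) 0
  let y := (B.zipIdx).foldl (fun acc bj => acc ||| ((bj.1.emod 2).toNat <<< bj.2)) 0
  let p := pvClmulLoop x 0 y x
  -- 'if p == 0: return []'
  if p = 0 then []
  else
    let r := pvRedLoop p p
    -- 'return out if out else [0]'
    match pvBitsLoop r r with
    | [] => [0]
    | out => out

-- ===== PRECONDITION & SPEC =====

def Spec_mull_pol (A : List Int) (B : List Int) (out : List Int) : Prop :=
  out = mull_pol_alt A B
instance (A : List Int) (B : List Int) (out : List Int) : Decidable (Spec_mull_pol A B out) := by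
  unfold Spec_mull_pol; infer_instance

-- ===== CLAIM (what is proved, stated in full; the proofs are below) =====
def Claim_equal_mull_pol : Prop := ∀ (A : List Int) (B : List Int), Dom_mull_pol A B → Spec_mull_pol A B (mull_pol A B)

-- ===== LEMMAS AND PROOFS =====

-- ---- proof-side notions: the bit value of a coefficient list, 0/1 lists, carry-less product
def pvBitOf (a : Int) : Nat := (a.emod 2).toNat
def pvToNat : List Int → Nat
  | [] => 0
  | a :: l => pvBitOf a + 2 * pvToNat l
def pvE01 (l : List Int) : Prop := ∀ a ∈ l, a = 0 ∨ a = 1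
def pvBL (n : Nat) : Nat := PySem.Int.bitLength (n : Int)

def pvCl (x y : Nat) : Nat :=
  if x = 0 then 0 else (if x % 2 = 1 then y else 0) ^^^ pvCl (x / 2) (2 * y)
termination_by x
decreasing_by exact Nat.div_lt_self (by omega) (by omega)

theorem pvTestBit_top (x k : Nat) (h1 : 2 ^ k ≤ x) (h2 : x < 2 ^ (k + 1)) :
    x.testBit k = true := by
  induction k generalizing x with
  | zero =>
    have : x = 1 := by omega
    subst this; decide
  | succ k ih =>
    rw [Nat.testBit_succ]
    apply ih
    · have h3 : 2 ^ (k + 1) = 2 * 2 ^ k := by ring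
      omega
    · have h3 : 2 ^ (k + 1 + 1) = 2 * 2 ^ (k + 1) := by ring
      omega

theorem pvEmod_two_eq (a : Int) : a.emod 2 = 0 ∨ a.emod 2 = 1 := Int.emod_two_eq a

-- ---- bit length facts
theorem pvBL_zero : pvBL 0 = 0 := by
  unfold pvBL
  exact_mod_cast PySem.Int.bitLength_zero

theorem pvBL_half (n : Nat) (h : 0 < n) : pvBL n = pvBL (n / 2) + 1 :=
  PySem.Int.bitLength_natCast h

theorem pvBL_lt (n : Nat) : n < 2 ^ pvBL n := by
  have := PySem.Int.lt_two_pow_bitLength (n : Int)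
  simpa [pvBL] using this

theorem pvBL_le (n : Nat) (h : n ≠ 0) : 2 ^ (pvBL n - 1) ≤ n := by
  have := PySem.Int.two_pow_bitLength_le (n : Int) (by exact_mod_cast h)
  simpa [pvBL] using this

theorem pvBL_mono_lt (a b : Nat) (h : pvBL a < pvBL b) : a < b := by
  have hb0 : b ≠ 0 := by
    intro h0; subst h0; rw [pvBL_zero] at h; omega
  calc a < 2 ^ pvBL a := pvBL_lt a
    _ ≤ 2 ^ (pvBL b - 1) := Nat.pow_le_pow_right (by norm_num) (by omega)
    _ ≤ b := pvBL_le b hb0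

theorem pvBL_le_of_lt_pow (n k : Nat) (h : n < 2 ^ k) : pvBL n ≤ k := by
  by_contra hk
  have hn0 : n ≠ 0 := by
    intro h0; subst h0; rw [pvBL_zero] at hk; omega
  have h1 := pvBL_le n hn0
  have h2 : 2 ^ k ≤ 2 ^ (pvBL n - 1) := Nat.pow_le_pow_right (by norm_num) (by omega)
  omega

theorem pvBL_eq_succ (n k : Nat) (h1 : 2 ^ k ≤ n) (h2 : n < 2 ^ (k + 1)) : pvBL n = k + 1 := by
  have hle := pvBL_le_of_lt_pow n (k + 1) h2
  have hn0 : n ≠ 0 := by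
    intro h0; subst h0
    have : 0 < 2 ^ k := Nat.pow_pos (by norm_num : 0 < 2)
    omega
  have hgt : k < pvBL n := by
    by_contra hk
    have h3 := pvBL_lt n
    have h4 : 2 ^ pvBL n ≤ 2 ^ k := Nat.pow_le_pow_right (by norm_num) (by omega)
    omega
  omega

-- ---- pvM facts
set_option maxRecDepth 10000 in
theorem pvM_lt : pvM < 2 ^ 192 := by decide
set_option maxRecDepth 10000 in
theorem pvM_ge : 2 ^ 191 ≤ pvM := by decide
set_option maxRecDepth 10000 in
theorem pvM_pos : 0 < pvM := by decide
set_option maxRecDepth 100000 in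
theorem pvM_testBit_191 : pvM.testBit 191 = true := by decide
set_option maxRecDepth 10000 in
theorem pvToNat_ourMod : pvToNat pvOurMod = pvM := by decide
set_option maxRecDepth 10000 in
theorem pvE01_ourMod : pvE01 pvOurMod := by unfold pvE01; decide
set_option maxRecDepth 10000 in
theorem pvOurMod_length : pvOurMod.length = 192 := by decide

-- ---- the reduction step decreases the value below its top bit
theorem pvRedStep_lt_pow (p : Nat) (h : pvM ≤ p) :
    p ^^^ (pvM <<< (pvBL p - 192)) < 2 ^ (pvBL p - 1) := by
  have hp0 : p ≠ 0 := by have := pvM_pos; omega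
  have hn192 : 192 ≤ pvBL p := by
    by_contra hc
    have h1 : p < 2 ^ pvBL p := pvBL_lt p
    have h2 : 2 ^ pvBL p ≤ 2 ^ 191 := Nat.pow_le_pow_right (by norm_num) (by omega)
    have h3 := pvM_ge
    omega
  set n := pvBL p with hn
  have hptop : p.testBit (n - 1) = true := by
    apply pvTestBit_top
    · exact pvBL_le p hp0
    · have he : n - 1 + 1 = n := by omega
      rw [he]; exact pvBL_lt p
  have hctop : (pvM <<< (n - 192)).testBit (n - 1) = true := by
    rw [Nat.testBit_shiftLeft]
    have h1 : n - 1 ≥ n - 192 := by omega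
    have h2 : n - 1 - (n - 192) = 191 := by omega
    simp [h1, h2, pvM_testBit_191]
  have hclt : pvM <<< (n - 192) < 2 ^ n := by
    rw [Nat.shiftLeft_eq]
    have h192 : (192 : Nat) + (n - 192) = n := by omega
    calc pvM * 2 ^ (n - 192) < 2 ^ 192 * 2 ^ (n - 192) := by
          have h1 := pvM_lt
          have h2 : 0 < 2 ^ (n - 192) := Nat.pow_pos (by norm_num : 0 < 2)
          exact mul_lt_mul_of_pos_right h1 h2
      _ = 2 ^ (192 + (n - 192)) := (pow_add 2 192 (n - 192)).symm
      _ = 2 ^ n := by rw [h192]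
  apply Nat.lt_pow_two_of_testBit
  intro i hi
  rw [Nat.testBit_xor]
  rcases eq_or_lt_of_le hi with heq | hlt
  · rw [← heq, hptop, hctop]; rfl
  · have hni : n ≤ i := by omega
    have hp2 : p < 2 ^ i := lt_of_lt_of_le (pvBL_lt p) (Nat.pow_le_pow_right (by norm_num) hni)
    have hc2 : pvM <<< (n - 192) < 2 ^ i :=
      lt_of_lt_of_le hclt (Nat.pow_le_pow_right (by norm_num) hni)
    rw [Nat.testBit_lt_two_pow hp2, Nat.testBit_lt_two_pow hc2]
    rfl

theorem pvRedStep_lt (p : Nat) (h : pvM ≤ p) :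
    p ^^^ (pvM <<< (pvBL p - 192)) < p := by
  have hp0 : p ≠ 0 := by have := pvM_pos; omega
  exact lt_of_lt_of_le (pvRedStep_lt_pow p h) (pvBL_le p hp0)

def pvRedSpec (p : Nat) : Nat :=
  if h : pvM ≤ p then pvRedSpec (p ^^^ (pvM <<< (pvBL p - 192))) else p
termination_by p
decreasing_by exact pvRedStep_lt p h

theorem pvBL_M : pvBL pvM = 192 := by
  apply pvBL_eq_succ
  · exact pvM_ge
  · exact pvM_lt

-- ---- basic bit identities
theorem pvBitXor (u v a b : Nat) (hu : u < 2) (hv : v < 2) :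
    (u + 2 * a) ^^^ (v + 2 * b) = (u ^^^ v) + 2 * (a ^^^ b) := by
  rcases (by omega : u = 0 ∨ u = 1) with rfl | rfl <;>
    rcases (by omega : v = 0 ∨ v = 1) with rfl | rfl
  · have h := Nat.xor_bit false a false b
    simp [Nat.bit_val] at h ⊢; omega
  · have h := Nat.xor_bit false a true b
    simp [Nat.bit_val] at h ⊢
    rw [show 1 + 2 * b = 2 * b + 1 by omega]
    omega
  · have h := Nat.xor_bit true a false b
    simp [Nat.bit_val] at h ⊢
    rw [show 1 + 2 * a = 2 * a + 1 by omega]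
    omega
  · have h := Nat.xor_bit true a true b
    simp [Nat.bit_val] at h ⊢
    rw [show 1 + 2 * a = 2 * a + 1 by omega, show 1 + 2 * b = 2 * b + 1 by omega]
    omega

theorem pvBitOr (u v a b : Nat) (hu : u < 2) (hv : v < 2) :
    (u + 2 * a) ||| (v + 2 * b) = (u ||| v) + 2 * (a ||| b) := by
  rcases (by omega : u = 0 ∨ u = 1) with rfl | rfl <;>
    rcases (by omega : v = 0 ∨ v = 1) with rfl | rfl
  · have h := Nat.lor_bit false a false b
    simp [Nat.bit_val] at h ⊢; omega
  · have h := Nat.lor_bit false a true b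
    simp [Nat.bit_val] at h ⊢
    rw [show 1 + 2 * b = 2 * b + 1 by omega]
    omega
  · have h := Nat.lor_bit true a false b
    simp [Nat.bit_val] at h ⊢
    rw [show 1 + 2 * a = 2 * a + 1 by omega]
    omega
  · have h := Nat.lor_bit true a true b
    simp [Nat.bit_val] at h ⊢
    rw [show 1 + 2 * a = 2 * a + 1 by omega, show 1 + 2 * b = 2 * b + 1 by omega]
    omega

theorem pvShift_double (w k : Nat) : w <<< (k + 1) = (2 * w) <<< k := by
  rw [Nat.shiftLeft_eq, Nat.shiftLeft_eq, pow_succ]; ring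

theorem pvShift_succ (w k : Nat) : w <<< (k + 1) = 2 * (w <<< k) := by
  rw [Nat.shiftLeft_eq, Nat.shiftLeft_eq, pow_succ]; ring

theorem pvXor_shift_pair (u w k : Nat) (hu : u < 2) :
    (u <<< k) ^^^ (w <<< (k + 1)) = (u + 2 * w) <<< k := by
  rw [pvShift_double]
  have h : u + 2 * w = u ^^^ 2 * w := by
    have := pvBitXor u 0 0 w hu (by omega)
    simpa using this.symm
  rw [h, Nat.shiftLeft_xor_distrib]

theorem pvBitOf_lt (a : Int) : pvBitOf a < 2 := by
  unfold pvBitOf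
  rcases pvEmod_two_eq a with h | h <;> rw [h] <;> decide

theorem pvBitOf_mul (a b : Int) : pvBitOf (a * b) = pvBitOf a * pvBitOf b := by
  unfold pvBitOf
  have hm : (a * b).emod 2 = ((a.emod 2) * (b.emod 2)).emod 2 := Int.mul_emod a b 2
  rw [hm]
  rcases pvEmod_two_eq a with h | h <;> rcases pvEmod_two_eq b with h' | h' <;>
    rw [h, h'] <;> decide

theorem pvBitOf_add (a b : Int) : pvBitOf (a + b) = pvBitOf a ^^^ pvBitOf b := by
  unfold pvBitOf
  have hm : (a + b).emod 2 = ((a.emod 2) + (b.emod 2)).emod 2 := Int.add_emod a b 2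
  rw [hm]
  rcases pvEmod_two_eq a with h | h <;> rcases pvEmod_two_eq b with h' | h' <;>
    rw [h, h'] <;> decide

theorem pvBitOf_sub (a b : Int) : pvBitOf (a - b) = pvBitOf a ^^^ pvBitOf b := by
  unfold pvBitOf
  have hm : (a - b).emod 2 = ((a.emod 2) - (b.emod 2)).emod 2 := Int.sub_emod a b 2
  rw [hm]
  rcases pvEmod_two_eq a with h | h <;> rcases pvEmod_two_eq b with h' | h' <;>
    rw [h, h'] <;> decide

theorem pvBitOf_emod (a : Int) : pvBitOf (a.emod 2) = pvBitOf a := by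
  unfold pvBitOf
  have hm : (a.emod 2).emod 2 = a.emod 2 := Int.emod_emod_of_dvd a (dvd_refl 2)
  rw [hm]

theorem pvBitOf_zero : pvBitOf 0 = 0 := rfl
theorem pvBitOf_one : pvBitOf 1 = 1 := rfl

-- ---- pvToNat basics
theorem pvToNat_cons (a : Int) (l : List Int) :
    pvToNat (a :: l) = pvBitOf a + 2 * pvToNat l := rfl

theorem pvToNat_replicate_zero (k : Nat) : pvToNat (List.replicate k 0) = 0 := by
  induction k with
  | zero => rfl
  | succ k ih => rw [List.replicate_succ, pvToNat_cons, pvBitOf_zero, ih]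

theorem pvToNat_append_zeros (l : List Int) (k : Nat) :
    pvToNat (l ++ List.replicate k 0) = pvToNat l := by
  induction l with
  | nil => simpa using pvToNat_replicate_zero k
  | cons a l ih => simp [pvToNat, ih]

theorem pvToNat_prepend_zeros (l : List Int) (k : Nat) :
    pvToNat (List.replicate k 0 ++ l) = 2 ^ k * pvToNat l := by
  induction k with
  | zero => simp
  | succ k ih =>
    simp only [List.replicate_succ, List.cons_append, pvToNat, pvBitOf]
    rw [ih]
    have h : ((0 : Int).emod 2).toNat = 0 := rfl
    rw [h, pow_succ]
    ring

-- ---- pvE01 basics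
theorem pvE01_nil : pvE01 [] := by intro a ha; cases ha
theorem pvE01_replicate (k : Nat) : pvE01 (List.replicate k 0) := by
  intro a ha
  left
  exact (List.eq_of_mem_replicate ha)
theorem pvE01_append {l1 l2 : List Int} (h1 : pvE01 l1) (h2 : pvE01 l2) : pvE01 (l1 ++ l2) := by
  intro a ha
  rcases List.mem_append.1 ha with h | h
  · exact h1 a h
  · exact h2 a h

def pvBitsSpec (p : Nat) : List Int :=
  ((p % 2 : Nat) : Int) :: (if _h : p / 2 = 0 then [] else pvBitsSpec (p / 2))
termination_by p
decreasing_by exact Nat.div_lt_self (by omega) (by omega)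

theorem pvRedSpec_lt (p : Nat) : pvRedSpec p < pvM := by
  induction p using Nat.strong_induction_on with
  | _ p ih =>
    rw [pvRedSpec]
    split
    · exact ih _ (pvRedStep_lt p ‹_›)
    · omega

theorem pvRedSpec_zero : pvRedSpec 0 = 0 := by
  rw [pvRedSpec, dif_neg]
  have := pvM_pos; omega

theorem pvRedSpec_step (p : Nat) (h : pvM ≤ p) :
    pvRedSpec p = pvRedSpec (p ^^^ (pvM <<< (pvBL p - 192))) := by
  rw [pvRedSpec, dif_pos h]

theorem pvRedSpec_of_lt (p : Nat) (h : p < pvM) : pvRedSpec p = p := by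
  rw [pvRedSpec, dif_neg (by omega)]

-- ---- pvBitsSpec: the canonical bit list of a number
theorem pvBitsSpec_zero_eq : pvBitsSpec 0 = [0] := by
  rw [pvBitsSpec]
  norm_num

theorem pvBitsSpec_toNat (n : Nat) : pvToNat (pvBitsSpec n) = n := by
  induction n using Nat.strong_induction_on with
  | _ n ih =>
    rw [pvBitsSpec]
    have h2 : ((n % 2 : Nat) : Int).emod 2 = ((n % 2 : Nat) : Int) := by
      rcases Nat.mod_two_eq_zero_or_one n with h' | h' <;> rw [h'] <;> rfl
    by_cases h : n / 2 = 0
    · rw [dif_pos h]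
      simp only [pvToNat, pvBitOf]
      rw [h2]
      simp
      omega
    · rw [dif_neg h]
      simp only [pvToNat, pvBitOf]
      rw [ih (n / 2) (Nat.div_lt_self (by omega) (by omega))]
      rw [h2]
      simp
      omega

theorem pvBitsSpec_e01 (n : Nat) : pvE01 (pvBitsSpec n) := by
  induction n using Nat.strong_induction_on with
  | _ n ih =>
    rw [pvBitsSpec]
    intro a ha
    rcases List.mem_cons.1 ha with rfl | ha
    · rcases Nat.mod_two_eq_zero_or_one n with h' | h' <;> rw [h']
      · left; rfl
      · right; rfl
    · by_cases h : n / 2 = 0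
      · rw [dif_pos h] at ha; cases ha
      · rw [dif_neg h] at ha
        exact ih (n / 2) (Nat.div_lt_self (by omega) (by omega)) a ha

theorem pvBitsSpec_ne_nil (n : Nat) : pvBitsSpec n ≠ [] := by
  rw [pvBitsSpec]; simp

theorem pvBitsSpec_length_pos (n : Nat) : 0 < (pvBitsSpec n).length := by
  rw [pvBitsSpec]; simp

theorem pvPnAux_bitsSpec (n : Nat) (h : n ≠ 0) : pvPnAux (pvBitsSpec n) = pvBitsSpec n := by
  induction n using Nat.strong_induction_on with
  | _ n ih =>
    rw [pvBitsSpec]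
    by_cases h2 : n / 2 = 0
    · rw [dif_pos h2]
      have h3 : n = 1 := by omega
      subst h3
      norm_num [pvPnAux]
    · rw [dif_neg h2]
      rw [pvPnAux]
      rw [ih (n / 2) (Nat.div_lt_self (by omega) (by omega)) h2]
      have h3 := pvBitsSpec_ne_nil (n / 2)
      cases h4 : pvBitsSpec (n / 2) with
      | nil => exact absurd h4 h3
      | cons b bs => rfl

theorem pvBitsSpec_length (n : Nat) (h : n ≠ 0) : (pvBitsSpec n).length = pvBL n := by
  induction n using Nat.strong_induction_on with
  | _ n ih =>
    rw [pvBitsSpec]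
    by_cases h2 : n / 2 = 0
    · rw [dif_pos h2]
      have h3 : n = 1 := by omega
      subst h3
      rw [pvBL_half 1 (by omega)]
      norm_num [pvBL_zero]
    · rw [dif_neg h2]
      simp only [List.length_cons]
      rw [ih (n / 2) (Nat.div_lt_self (by omega) (by omega)) h2]
      rw [pvBL_half n (by omega)]

theorem pvPopNull_bitsSpec (n : Nat) : pvPopNull (pvBitsSpec n) = pvBitsSpec n := by
  by_cases h : n = 0
  · subst h
    rw [pvBitsSpec_zero_eq]
    rfl
  · unfold pvPopNull
    rw [pvPnAux_bitsSpec n h]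
    have h3 := pvBitsSpec_ne_nil n
    cases h4 : pvBitsSpec n with
    | nil => exact absurd h4 h3
    | cons b bs => rfl

-- ---- pop_null bridges
theorem pvPnAux_eq (l : List Int) (h : pvE01 l) :
    pvPnAux l = if pvToNat l = 0 then [] else pvBitsSpec (pvToNat l) := by
  induction l with
  | nil => simp [pvPnAux, pvToNat]
  | cons a l ih =>
    have ha := h a (List.mem_cons_self)
    have hl : pvE01 l := fun x hx => h x (List.mem_cons_of_mem a hx)
    rw [pvPnAux, ih hl]
    by_cases h0 : pvToNat l = 0
    · rw [if_pos h0]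
      have hcons : pvToNat (a :: l) = pvBitOf a + 2 * pvToNat l := rfl
      rcases ha with rfl | rfl
      · rw [if_pos rfl, if_pos (by rw [hcons, h0, pvBitOf_zero])]
      · rw [if_neg (by norm_num), if_neg (by rw [hcons, h0, pvBitOf_one]; omega)]
        rw [hcons, h0, pvBitOf_one]
        rw [pvBitsSpec]
        norm_num
    · rw [if_neg h0]
      have h3 := pvBitsSpec_ne_nil (pvToNat l)
      have hcons : pvToNat (a :: l) = pvBitOf a + 2 * pvToNat l := rfl
      have hne : pvToNat (a :: l) ≠ 0 := by
        rw [hcons]; omega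
      rw [if_neg hne]
      conv_rhs => rw [pvBitsSpec]
      have hmod : pvToNat (a :: l) % 2 = pvBitOf a := by
        rw [hcons]
        have := pvBitOf_lt a
        omega
      have hdiv : pvToNat (a :: l) / 2 = pvToNat l := by
        rw [hcons]
        have := pvBitOf_lt a
        omega
      rw [hmod, hdiv, dif_neg h0]
      have hhead : ((pvBitOf a : Nat) : Int) = a := by
        rcases ha with rfl | rfl <;> rfl
      rw [hhead]
      cases h4 : pvBitsSpec (pvToNat l) with
      | nil => exact absurd h4 h3
      | cons b bs => rfl

theorem pvPopNull_eq (l : List Int) (h : pvE01 l) :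
    pvPopNull l = pvBitsSpec (pvToNat l) := by
  unfold pvPopNull
  rw [pvPnAux_eq l h]
  by_cases h0 : pvToNat l = 0
  · rw [if_pos h0, h0, pvBitsSpec_zero_eq]
  · rw [if_neg h0]
    have h3 := pvBitsSpec_ne_nil (pvToNat l)
    cases h4 : pvBitsSpec (pvToNat l) with
    | nil => exact absurd h4 h3
    | cons b bs => rfl

theorem pvPnAux_length_le (l : List Int) : (pvPnAux l).length ≤ l.length := by
  induction l with
  | nil => simp [pvPnAux]
  | cons a l ih =>
    have hunf : pvPnAux (a :: l) = (match pvPnAux l with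
      | [] => if a = 0 then [] else [a]
      | r => a :: r) := rfl
    rw [hunf]
    cases h : pvPnAux l with
    | nil =>
      rw [h] at ih
      dsimp only
      split <;> simp only [List.length_nil, List.length_cons] <;> omega
    | cons b bs =>
      rw [h] at ih
      dsimp only
      simp only [List.length_cons] at ih ⊢
      omega

-- ---- cmp computes the numeric comparison of the two bit values
theorem pvCmpHigh_eq (l1 : List Int) : ∀ (l2 : List Int), pvE01 l1 → pvE01 l2 →
    l1.length = l2.length →
    pvCmpHigh l1 l2 = (if pvToNat l1 < pvToNat l2 then -1
                       else if pvToNat l1 = pvToNat l2 then 0 else 1) := by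
  induction l1 with
  | nil =>
    intro l2 _ _ hl
    have h : l2 = [] := by
      cases l2 with
      | nil => rfl
      | cons b bs => simp at hl
    subst h
    simp [pvCmpHigh, pvToNat]
  | cons a l1 ih =>
    intro l2 h1 h2 hl
    cases l2 with
    | nil => simp at hl
    | cons b l2 =>
      have ha := h1 a List.mem_cons_self
      have hb := h2 b List.mem_cons_self
      have h1' : pvE01 l1 := fun x hx => h1 x (List.mem_cons_of_mem a hx)
      have h2' : pvE01 l2 := fun x hx => h2 x (List.mem_cons_of_mem b hx)
      have hl' : l1.length = l2.length := by simpa using hl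
      have hunf : pvCmpHigh (a :: l1) (b :: l2)
          = (if pvCmpHigh l1 l2 = 0
             then (if a = b then 0 else if a > b then 1 else -1)
             else pvCmpHigh l1 l2) := rfl
      rw [hunf, ih l2 h1' h2' hl']
      have hnc1 : pvToNat (a :: l1) = pvBitOf a + 2 * pvToNat l1 := rfl
      have hnc2 : pvToNat (b :: l2) = pvBitOf b + 2 * pvToNat l2 := rfl
      rcases ha with rfl | rfl <;> rcases hb with rfl | rfl <;>
        simp only [hnc1, hnc2, pvBitOf_zero, pvBitOf_one] <;>
        split_ifs <;> omega

theorem pvBitsLen_mono (u v : Nat) (h : (pvBitsSpec u).length < (pvBitsSpec v).length) :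
    u < v := by
  have hv0 : v ≠ 0 := by
    intro h0; subst h0
    have h1 := pvBitsSpec_length_pos u
    have h2 : (pvBitsSpec 0).length = 1 := by rw [pvBitsSpec_zero_eq]; rfl
    omega
  by_cases hu0 : u = 0
  · subst hu0; omega
  · rw [pvBitsSpec_length u hu0, pvBitsSpec_length v hv0] at h
    exact pvBL_mono_lt u v h

theorem pvCmp_eq (A B : List Int) (hA : pvE01 A) (hB : pvE01 B) :
    pvCmp A B = (if pvToNat A < pvToNat B then -1
                 else if pvToNat A = pvToNat B then 0 else 1) := by
  unfold pvCmp
  simp only [pvPopNull_eq A hA, pvPopNull_eq B hB]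
  rcases lt_trichotomy (pvBitsSpec (pvToNat A)).length (pvBitsSpec (pvToNat B)).length
    with hc | hc | hc
  · have hxy : pvToNat A < pvToNat B := pvBitsLen_mono _ _ hc
    rw [if_neg (by omega), if_pos (by omega), if_pos hxy]
  · rw [if_neg (by omega), if_neg (by omega)]
    rw [pvCmpHigh_eq _ _ (pvBitsSpec_e01 _) (pvBitsSpec_e01 _) hc]
    rw [pvBitsSpec_toNat, pvBitsSpec_toNat]
  · have hxy : pvToNat B < pvToNat A := pvBitsLen_mono _ _ hc
    rw [if_pos (by omega), if_neg (by omega), if_neg (by omega)]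

-- ---- subtraction mod 2 is XOR
theorem pvZipSub_toNat (l1 : List Int) : ∀ (l2 : List Int), l1.length = l2.length →
    pvToNat (List.zipWith (fun a b => (a - b).emod 2) l1 l2) = pvToNat l1 ^^^ pvToNat l2 := by
  induction l1 with
  | nil =>
    intro l2 hl
    cases l2 with
    | nil => rfl
    | cons b bs => simp at hl
  | cons a l1 ih =>
    intro l2 hl
    cases l2 with
    | nil => simp at hl
    | cons b l2 =>
      have hl' : l1.length = l2.length := by simpa using hl
      simp only [List.zipWith_cons_cons, pvToNat]
      rw [ih l2 hl', pvBitOf_emod, pvBitOf_sub]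
      exact (pvBitXor _ _ _ _ (pvBitOf_lt a) (pvBitOf_lt b)).symm

theorem pvZipSub_e01 (l1 : List Int) : ∀ (l2 : List Int),
    pvE01 (List.zipWith (fun a b => (a - b).emod 2) l1 l2) := by
  induction l1 with
  | nil => intro l2 x hx; simp at hx
  | cons a l1 ih =>
    intro l2
    cases l2 with
    | nil => intro x hx; simp at hx
    | cons b l2 =>
      intro x hx
      simp only [List.zipWith_cons_cons] at hx
      rcases List.mem_cons.1 hx with rfl | hx
      · rcases Int.emod_two_eq (a - b) with h | h
        · left; exact h
        · right; exact h
      · exact ih l2 x hx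

-- ---- equal_length facts
theorem pvEqualLength_def (A B : List Int) : pvEqualLength A B
    = (if ((A.length : Int) - (B.length : Int)) > 0
       then (A, B ++ List.replicate ((A.length : Int) - (B.length : Int)).toNat 0)
       else if ((A.length : Int) - (B.length : Int)) < 0
       then (A ++ List.replicate (-((A.length : Int) - (B.length : Int))).toNat 0, B)
       else (A, B)) := rfl

theorem pvEqualLength_fst_toNat (A B : List Int) : pvToNat (pvEqualLength A B).1 = pvToNat A := by
  rw [pvEqualLength_def]
  split_ifs <;> simp [pvToNat_append_zeros]

theorem pvEqualLength_snd_toNat (A B : List Int) : pvToNat (pvEqualLength A B).2 = pvToNat B := by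
  rw [pvEqualLength_def]
  split_ifs <;> simp [pvToNat_append_zeros]

theorem pvEqualLength_fst_len (A B : List Int) :
    (pvEqualLength A B).1.length = max A.length B.length := by
  rw [pvEqualLength_def]
  split_ifs with h1 h2 <;> simp <;> omega

theorem pvEqualLength_snd_len (A B : List Int) :
    (pvEqualLength A B).2.length = max A.length B.length := by
  rw [pvEqualLength_def]
  split_ifs with h1 h2 <;> simp <;> omega

theorem pvEqualLength_of_eq (A B : List Int) (h : A.length = B.length) :
    pvEqualLength A B = (A, B) := by
  rw [pvEqualLength_def]
  rw [if_neg (by omega), if_neg (by omega)]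

-- ---- carry-less product facts
theorem pvCl_unfold (x y : Nat) :
    pvCl x y = (if x % 2 = 1 then y else 0) ^^^ pvCl (x / 2) (2 * y) := by
  by_cases h : x = 0
  · subst h
    rw [pvCl, if_pos rfl]
    rw [if_neg (by norm_num)]
    rw [show (0 : Nat) / 2 = 0 by norm_num]
    rw [pvCl, if_pos rfl, Nat.xor_zero]
  · rw [pvCl, if_neg h]

theorem pvCl_zero_left (y : Nat) : pvCl 0 y = 0 := by
  rw [pvCl, if_pos rfl]

theorem pvXor_two_mul (a b : Nat) : (2 * a) ^^^ (2 * b) = 2 * (a ^^^ b) := by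
  have h := pvBitXor 0 0 a b (by omega) (by omega)
  simpa using h

theorem pvCl_two_mul (x : Nat) : ∀ (y : Nat), pvCl x (2 * y) = 2 * pvCl x y := by
  induction x using Nat.strong_induction_on with
  | _ x ih =>
    intro y
    by_cases h : x = 0
    · rw [h, pvCl_zero_left, pvCl_zero_left]
    · rw [pvCl_unfold x (2 * y), pvCl_unfold x y]
      rw [ih (x / 2) (Nat.div_lt_self (by omega) (by omega)) (2 * y)]
      by_cases h3 : x % 2 = 1
      · rw [if_pos h3, if_pos h3, pvXor_two_mul]
      · rw [if_neg h3, if_neg h3]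
        rw [show (0 : Nat) = 2 * 0 from rfl, pvXor_two_mul]

-- ---- the fuelled loops of port B compute their specs
theorem pvRedLoop_eq (fuel : Nat) : ∀ (p : Nat), p ≤ fuel → pvRedLoop fuel p = pvRedSpec p := by
  induction fuel with
  | zero =>
    intro p h
    have h0 : p = 0 := by omega
    subst h0
    rw [pvRedSpec_zero]
    rfl
  | succ fuel ih =>
    intro p h
    rw [pvRedLoop]
    have hbl : PySem.Int.bitLength (p : Int) = pvBL p := rfl
    by_cases h2 : pvM ≤ p
    · rw [if_pos h2, hbl, ih _ (by have h3 := pvRedStep_lt p h2; omega)]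
      exact (pvRedSpec_step p h2).symm
    · rw [if_neg h2, pvRedSpec_of_lt p (by omega)]

theorem pvBitsLoop_eq (fuel : Nat) : ∀ (p : Nat), p ≤ fuel →
    pvBitsLoop fuel p = (if p = 0 then [] else pvBitsSpec p) := by
  induction fuel with
  | zero =>
    intro p h
    have h0 : p = 0 := by omega
    subst h0
    rw [if_pos rfl]
    rfl
  | succ fuel ih =>
    intro p h
    rw [pvBitsLoop]
    by_cases h2 : p = 0
    · rw [if_pos h2, if_pos h2]
    · rw [if_neg h2, if_neg h2]
      rw [ih _ (by have h3 := Nat.div_lt_self (by omega : 0 < p) (by omega : 1 < 2); omega)]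
      conv_rhs => rw [pvBitsSpec]
      by_cases h4 : p / 2 = 0
      · rw [if_pos h4, dif_pos h4]
      · rw [if_neg h4, dif_neg h4]

theorem pvClmulLoop_eq (fuel : Nat) : ∀ (p y x : Nat), x ≤ fuel →
    pvClmulLoop fuel p y x = p ^^^ pvCl x y := by
  induction fuel with
  | zero =>
    intro p y x h
    have h0 : x = 0 := by omega
    subst h0
    show p = p ^^^ pvCl 0 y
    rw [pvCl_zero_left, Nat.xor_zero]
  | succ fuel ih =>
    intro p y x h
    rw [pvClmulLoop]
    by_cases h2 : x = 0
    · rw [if_pos h2, h2, pvCl_zero_left, Nat.xor_zero]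
    · rw [if_neg h2]
      have hx2 : x >>> 1 = x / 2 := Nat.shiftRight_one x
      have hy2 : y <<< 1 = 2 * y := by rw [Nat.shiftLeft_eq]; ring
      rw [hx2, hy2, ih _ _ _ (by have h3 := Nat.div_lt_self (by omega : 0 < x) (by omega : 1 < 2); omega)]
      conv_rhs => rw [pvCl]
      rw [if_neg h2]
      by_cases h3 : x % 2 = 1
      · rw [if_pos h3, if_pos h3, Nat.xor_assoc]
      · rw [if_neg h3, if_neg h3, Nat.zero_xor]

theorem pvRedSpec_M : pvRedSpec pvM = 0 := by
  rw [pvRedSpec_step _ le_rfl, pvBL_M, show (192 : Nat) - 192 = 0 from rfl,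
    Nat.shiftLeft_zero, Nat.xor_self, pvRedSpec_zero]

-- ---- the B-side packing fold computes pvToNat
theorem pvOrShift (acc b i : Nat) (h : acc < 2 ^ i) (hb : b < 2) :
    acc ||| (b <<< i) = acc + b * 2 ^ i := by
  induction i generalizing acc with
  | zero =>
    have h0 : acc = 0 := by omega
    subst h0
    simp [Nat.shiftLeft_eq]
  | succ i ih =>
    have hsplit : acc = acc % 2 + 2 * (acc / 2) := by omega
    have hshift : b <<< (i + 1) = 0 + 2 * (b <<< i) := by
      rw [pvShift_succ]
      omega
    conv_lhs => rw [hsplit, hshift]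
    rw [pvBitOr _ _ _ _ (by omega) (by omega)]
    have hdiv : acc / 2 < 2 ^ i := by
      have h2 : 2 ^ (i + 1) = 2 * 2 ^ i := by ring
      omega
    rw [ih (acc / 2) hdiv]
    rw [Nat.or_zero, pow_succ]
    have hmod : acc % 2 + 2 * (acc / 2 + b * 2 ^ i) = acc + b * (2 ^ i * 2) := by
      have hx : acc % 2 + 2 * (acc / 2) = acc := by omega
      ring_nf
      ring_nf at hx
      omega
    exact hmod

theorem pvPack_eq (l : List Int) : ∀ (i acc : Nat), acc < 2 ^ i →
    (l.zipIdx i).foldl (fun acc ai => acc ||| ((ai.1.emod 2).toNat <<< ai.2)) acc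
      = acc + 2 ^ i * pvToNat l := by
  induction l with
  | nil => intro i acc h; simp [pvToNat]
  | cons a l ih =>
    intro i acc h
    rw [List.zipIdx_cons, List.foldl_cons]
    dsimp only
    have hstep : acc ||| ((a.emod 2).toNat <<< i) = acc + pvBitOf a * 2 ^ i :=
      pvOrShift acc (pvBitOf a) i h (pvBitOf_lt a)
    rw [hstep]
    have hlt : acc + pvBitOf a * 2 ^ i < 2 ^ (i + 1) := by
      have h1 := pvBitOf_lt a
      have h2 : 2 ^ (i + 1) = 2 * 2 ^ i := by ring
      have h3 : pvBitOf a * 2 ^ i ≤ 2 ^ i := by nlinarith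
      omega
    rw [ih (i + 1) _ hlt]
    have hco : pvToNat (a :: l) = pvBitOf a + 2 * pvToNat l := rfl
    rw [hco, pow_succ]
    ring

-- ---- the A-side nested multiplication loops compute the carry-less product
theorem pvSet_toNat (r : List Int) : ∀ (k : Nat) (v : Int), pvE01 r → k < r.length →
    pvToNat (r.set k ((r.getD k 0 + v).emod 2)) = pvToNat r ^^^ (pvBitOf v <<< k)
    ∧ pvE01 (r.set k ((r.getD k 0 + v).emod 2)) := by
  induction r with
  | nil => intro k v _ hk; simp at hk
  | cons e rest ih =>
    intro k v hr hk
    have he := hr e List.mem_cons_self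
    have hrest : pvE01 rest := fun x hx => hr x (List.mem_cons_of_mem e hx)
    cases k with
    | zero =>
      simp only [List.set_cons_zero, List.getD_cons_zero]
      constructor
      · show pvBitOf ((e + v).emod 2) + 2 * pvToNat rest
            = (pvBitOf e + 2 * pvToNat rest) ^^^ (pvBitOf v <<< 0)
        rw [pvBitOf_emod, pvBitOf_add, Nat.shiftLeft_zero]
        have h := pvBitXor (pvBitOf e) (pvBitOf v) (pvToNat rest) 0
          (pvBitOf_lt e) (pvBitOf_lt v)
        simp only [Nat.mul_zero, Nat.add_zero, Nat.xor_zero] at h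
        omega
      · intro x hx
        rcases List.mem_cons.1 hx with rfl | hx
        · rcases Int.emod_two_eq (e + v) with h' | h'
          · left; exact h'
          · right; exact h'
        · exact hrest x hx
    | succ k =>
      simp only [List.set_cons_succ, List.getD_cons_succ]
      have hk' : k < rest.length := by simpa using hk
      obtain ⟨h1, h2⟩ := ih k v hrest hk'
      constructor
      · show pvBitOf e + 2 * pvToNat (rest.set k ((rest.getD k 0 + v).emod 2))
            = (pvBitOf e + 2 * pvToNat rest) ^^^ (pvBitOf v <<< (k + 1))
        rw [h1, pvShift_succ]
        have h := pvBitXor (pvBitOf e) 0 (pvToNat rest) (pvBitOf v <<< k)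
          (pvBitOf_lt e) (by omega)
        simp only [Nat.zero_add, Nat.xor_zero] at h
        omega
      · intro x hx
        rcases List.mem_cons.1 hx with rfl | hx
        · exact he
        · exact h2 x hx

theorem pvRow_eq (Bl : List Int) : ∀ (r : List Int) (i j0 : Nat) (a : Int),
    pvE01 r → i + j0 + Bl.length ≤ r.length →
    pvToNat ((Bl.zipIdx j0).foldl (fun res bj =>
        if bj.1 = 0 then res
        else res.set (i + bj.2) ((res.getD (i + bj.2) 0 + a * bj.1).emod 2)) r)
      = pvToNat r ^^^ ((pvBitOf a * pvToNat Bl) <<< (i + j0))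
    ∧ pvE01 ((Bl.zipIdx j0).foldl (fun res bj =>
        if bj.1 = 0 then res
        else res.set (i + bj.2) ((res.getD (i + bj.2) 0 + a * bj.1).emod 2)) r)
    ∧ ((Bl.zipIdx j0).foldl (fun res bj =>
        if bj.1 = 0 then res
        else res.set (i + bj.2) ((res.getD (i + bj.2) 0 + a * bj.1).emod 2)) r).length = r.length := by
  induction Bl with
  | nil =>
    intro r i j0 a hr _
    refine ⟨?_, hr, rfl⟩
    have h0 : pvToNat ([] : List Int) = 0 := rfl
    rw [List.zipIdx_nil, List.foldl_nil, h0, Nat.mul_zero, Nat.zero_shiftLeft, Nat.xor_zero]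
  | cons b bl ih =>
    intro r i j0 a hr hlen
    rw [List.zipIdx_cons, List.foldl_cons]
    dsimp only
    have hTB : pvToNat (b :: bl) = pvBitOf b + 2 * pvToNat bl := rfl
    by_cases hb : b = 0
    · rw [if_pos hb]
      have hlen' : i + (j0 + 1) + bl.length ≤ r.length := by
        simp only [List.length_cons] at hlen; omega
      obtain ⟨h1, h2, h3⟩ := ih r i (j0 + 1) a hr hlen'
      refine ⟨?_, h2, h3⟩
      rw [h1, hTB]
      have hb0 : pvBitOf b = 0 := by subst hb; rfl
      rw [hb0]
      congr 1
      rw [show i + (j0 + 1) = (i + j0) + 1 by omega, pvShift_double]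
      congr 1
      ring
    · rw [if_neg hb]
      have hk : i + j0 < r.length := by
        simp only [List.length_cons] at hlen; omega
      obtain ⟨hs1, hs2⟩ := pvSet_toNat r (i + j0) (a * b) hr hk
      have hlen1 : (r.set (i + j0) ((r.getD (i + j0) 0 + a * b).emod 2)).length = r.length := by
        simp
      have hlen' : i + (j0 + 1) + bl.length
          ≤ (r.set (i + j0) ((r.getD (i + j0) 0 + a * b).emod 2)).length := by
        rw [hlen1]
        simp only [List.length_cons] at hlen; omega
      obtain ⟨h1, h2, h3⟩ := ih (r.set (i + j0) ((r.getD (i + j0) 0 + a * b).emod 2))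
        i (j0 + 1) a hs2 hlen'
      refine ⟨?_, h2, by rw [h3, hlen1]⟩
      rw [h1, hs1, Nat.xor_assoc, hTB]
      congr 1
      rw [pvBitOf_mul]
      rw [show i + (j0 + 1) = (i + j0) + 1 by omega]
      have hu : pvBitOf a * pvBitOf b < 2 := by
        have h4 := pvBitOf_lt a
        have h5 := pvBitOf_lt b
        nlinarith
      rw [pvXor_shift_pair _ _ _ hu]
      congr 1
      ring

theorem pvOuter_eq (Al : List Int) (Bl : List Int) : ∀ (r : List Int) (i0 : Nat),
    pvE01 r → i0 + Al.length + Bl.length ≤ r.length + 1 →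
    pvToNat ((Al.zipIdx i0).foldl (fun res ai =>
        if ai.1 = 0 then res
        else (Bl.zipIdx).foldl (fun res bj =>
          if bj.1 = 0 then res
          else res.set (ai.2 + bj.2) ((res.getD (ai.2 + bj.2) 0 + ai.1 * bj.1).emod 2)) res) r)
      = pvToNat r ^^^ (pvCl (pvToNat Al) (pvToNat Bl) <<< i0)
    ∧ pvE01 ((Al.zipIdx i0).foldl (fun res ai =>
        if ai.1 = 0 then res
        else (Bl.zipIdx).foldl (fun res bj =>
          if bj.1 = 0 then res
          else res.set (ai.2 + bj.2) ((res.getD (ai.2 + bj.2) 0 + ai.1 * bj.1).emod 2)) res) r) := by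
  induction Al with
  | nil =>
    intro r i0 hr _
    refine ⟨?_, hr⟩
    have h0 : pvToNat ([] : List Int) = 0 := rfl
    rw [List.zipIdx_nil, List.foldl_nil, h0, pvCl_zero_left, Nat.zero_shiftLeft, Nat.xor_zero]
  | cons a al ih =>
    intro r i0 hr hlen
    rw [List.zipIdx_cons, List.foldl_cons]
    dsimp only
    have hTA : pvToNat (a :: al) = pvBitOf a + 2 * pvToNat al := rfl
    have hba := pvBitOf_lt a
    have hmod : pvToNat (a :: al) % 2 = pvBitOf a := by rw [hTA]; omega
    have hdiv : pvToNat (a :: al) / 2 = pvToNat al := by rw [hTA]; omega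
    have hclx : pvCl (pvToNat (a :: al)) (pvToNat Bl)
        = (pvBitOf a * pvToNat Bl) ^^^ 2 * pvCl (pvToNat al) (pvToNat Bl) := by
      rw [pvCl_unfold, hmod, hdiv, pvCl_two_mul]
      congr 1
      by_cases hodd : pvBitOf a = 1
      · rw [if_pos hodd, hodd, one_mul]
      · rw [if_neg (by omega)]
        have h0 : pvBitOf a = 0 := by omega
        rw [h0, zero_mul]
    have hshape : ∀ X : Nat,
        (pvBitOf a * pvToNat Bl) <<< i0 ^^^ (X <<< (i0 + 1))
          = ((pvBitOf a * pvToNat Bl) ^^^ 2 * X) <<< i0 := by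
      intro X
      rw [pvShift_double X i0, ← Nat.shiftLeft_xor_distrib]
    by_cases ha : a = 0
    · rw [if_pos ha]
      have hlen2 : i0 + 1 + al.length + Bl.length ≤ r.length + 1 := by
        simp only [List.length_cons] at hlen; omega
      obtain ⟨h1, h2⟩ := ih r (i0 + 1) hr hlen2
      refine ⟨?_, h2⟩
      rw [h1, hclx]
      have ha0 : pvBitOf a = 0 := by subst ha; rfl
      rw [ha0, zero_mul, Nat.zero_xor, pvShift_double]
    · rw [if_neg ha]
      have hlenBl : i0 + 0 + Bl.length ≤ r.length := by
        simp only [List.length_cons] at hlen; omega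
      obtain ⟨hr1, hr2, hr3⟩ := pvRow_eq Bl r i0 0 a hr hlenBl
      have hlen2 : i0 + 1 + al.length + Bl.length
          ≤ ((Bl.zipIdx).foldl (fun res bj =>
              if bj.1 = 0 then res
              else res.set (i0 + bj.2) ((res.getD (i0 + bj.2) 0 + a * bj.1).emod 2)) r).length + 1 := by
        rw [hr3]
        simp only [List.length_cons] at hlen; omega
      obtain ⟨h1, h2⟩ := ih _ (i0 + 1) hr2 hlen2
      refine ⟨?_, h2⟩
      rw [h1, hr1, Nat.add_zero, Nat.xor_assoc, hclx, hshape]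

-- ---- the reduction machinery of port A computes pvRedSpec
theorem pvModPol_eq (n : Nat) : ∀ (p : List Int) (f : Nat), pvE01 p → pvToNat p = n →
    8 * (pvPnAux p).length + 8 ≤ f →
    pvModPol f p = (if n = 0 then [] else pvBitsSpec (pvRedSpec n)) := by
  induction n using Nat.strong_induction_on with
  | _ n ih =>
    intro p f hp htn hf
    obtain ⟨f1, rfl⟩ : ∃ f1, f = f1 + 1 := ⟨f - 1, by omega⟩
    rw [pvModPol]
    obtain ⟨f2, rfl⟩ : ∃ f2, f1 = f2 + 1 := ⟨f1 - 1, by omega⟩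
    rw [pvDivPol]
    try dsimp only
    rw [pvPopNull_eq p hp, htn]
    rw [pvCmp_eq _ _ (pvBitsSpec_e01 n) pvE01_ourMod, pvBitsSpec_toNat, pvToNat_ourMod]
    rcases lt_trichotomy n pvM with hc | hc | hc
    · -- n < pvM : early return, remainder is the popped list (possibly [])
      rw [if_pos hc, if_neg (show ¬((-1 : Int) = 0) by norm_num),
        if_pos (show ((-1 : Int) = -1) from rfl)]
      rw [pvPnAux_eq _ (pvBitsSpec_e01 n), pvBitsSpec_toNat]
      by_cases h0 : n = 0
      · rw [if_pos h0, if_pos h0]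
      · rw [if_neg h0, if_neg h0, pvRedSpec_of_lt n hc]
    · -- n = pvM : the compare is 0, remainder [0]
      subst hc
      rw [if_neg (lt_irrefl pvM), if_pos (show pvM = pvM from rfl),
        if_pos (show ((0 : Int) = 0) from rfl)]
      rw [if_neg (show ¬(pvM = 0) by have := pvM_pos; omega)]
      rw [pvRedSpec_M, pvBitsSpec_zero_eq]
    · -- n > pvM : one subtraction step, then the loop exits
      have hn0 : n ≠ 0 := by have := pvM_pos; omega
      rw [if_neg (show ¬(n < pvM) by omega), if_neg (show ¬(n = pvM) by omega),
        if_neg (show ¬((1 : Int) = 0) by norm_num), if_neg (show ¬((1 : Int) = -1) by norm_num),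
        if_neg hn0]
      have hlen : (pvBitsSpec n).length = pvBL n := pvBitsSpec_length n hn0
      have ht192 : 192 ≤ pvBL n := by
        by_contra hcon
        have h1 := pvBL_lt n
        have h2 : 2 ^ pvBL n ≤ 2 ^ 191 := Nat.pow_le_pow_right (by norm_num) (by omega)
        have h3 := pvM_ge
        omega
      have hppn : (pvPnAux p).length = pvBL n := by
        rw [pvPnAux_eq p hp, htn, if_neg hn0, hlen]
      rw [hppn] at hf
      obtain ⟨f3, rfl⟩ : ∃ f3, f2 = f3 + 1 := ⟨f2 - 1, by omega⟩
      rw [pvDivLoop]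
      try dsimp only
      rw [pvCmp_eq _ _ (pvBitsSpec_e01 n) pvE01_ourMod, pvBitsSpec_toNat, pvToNat_ourMod]
      rw [if_neg (show ¬(n < pvM) by omega), if_neg (show ¬(n = pvM) by omega),
        if_pos (show ((1 : Int) ≠ -1) by norm_num), pvOurMod_length, hlen]
      obtain ⟨f4, rfl⟩ : ∃ f4, f3 = f4 + 1 := ⟨f3 - 1, by omega⟩
      rw [pvSubPol]
      try dsimp only
      rw [pvEqualLength_of_eq _ _ (by
        rw [hlen]
        unfold pvAppendNull
        simp [pvOurMod_length]
        omega)]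
      try dsimp only
      have hce : pvE01 (pvAppendNull pvOurMod (pvBL n - 192)) := by
        unfold pvAppendNull
        exact pvE01_append (pvE01_replicate _) pvE01_ourMod
      have hctn : pvToNat (pvAppendNull pvOurMod (pvBL n - 192)) = pvM <<< (pvBL n - 192) := by
        unfold pvAppendNull
        rw [pvToNat_prepend_zeros, pvToNat_ourMod, Nat.shiftLeft_eq]
        ring
      have hclen : (pvAppendNull pvOurMod (pvBL n - 192)).length = pvBL n := by
        unfold pvAppendNull
        simp [pvOurMod_length]
        omega
      have hzl_tn : pvToNat (List.zipWith (fun a b => (a - b).emod 2) (pvBitsSpec n)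
          (pvAppendNull pvOurMod (pvBL n - 192))) = n ^^^ (pvM <<< (pvBL n - 192)) := by
        rw [pvZipSub_toNat _ _ (by rw [hlen, hclen]), pvBitsSpec_toNat, hctn]
      have hzl_e := pvZipSub_e01 (pvBitsSpec n) (pvAppendNull pvOurMod (pvBL n - 192))
      have hnx_lt_pow : n ^^^ (pvM <<< (pvBL n - 192)) < 2 ^ (pvBL n - 1) :=
        pvRedStep_lt_pow n (by omega)
      have hnx_lt : n ^^^ (pvM <<< (pvBL n - 192)) < n := pvRedStep_lt n (by omega)
      have hpnzl : (pvPnAux (List.zipWith (fun a b => (a - b).emod 2) (pvBitsSpec n)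
          (pvAppendNull pvOurMod (pvBL n - 192)))).length ≤ pvBL n - 1 := by
        rw [pvPnAux_eq _ hzl_e, hzl_tn]
        by_cases h0 : n ^^^ (pvM <<< (pvBL n - 192)) = 0
        · rw [if_pos h0]; simp
        · rw [if_neg h0, pvBitsSpec_length _ h0]
          exact pvBL_le_of_lt_pow _ _ hnx_lt_pow
      rw [ih _ hnx_lt _ f4 hzl_e hzl_tn (by omega)]
      have hred : pvRedSpec n = pvRedSpec (n ^^^ (pvM <<< (pvBL n - 192))) :=
        pvRedSpec_step n (by omega)
      obtain ⟨f5, rfl⟩ : ∃ f5, f4 = f5 + 1 := ⟨f4 - 1, by omega⟩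
      rw [pvDivLoop]
      try dsimp only
      by_cases h0 : n ^^^ (pvM <<< (pvBL n - 192)) = 0
      · rw [if_pos h0]
        rw [pvCmp_eq _ _ pvE01_nil pvE01_ourMod, pvToNat_ourMod,
          show pvToNat ([] : List Int) = 0 from rfl]
        rw [if_pos pvM_pos]
        rw [if_neg (show ¬((-1 : Int) ≠ -1) by norm_num)]
        show pvPopNull ([] : List Int) = pvBitsSpec (pvRedSpec n)
        rw [hred, h0, pvRedSpec_zero, pvBitsSpec_zero_eq]
        rfl
      · rw [if_neg h0]
        rw [pvCmp_eq _ _ (pvBitsSpec_e01 _) pvE01_ourMod, pvBitsSpec_toNat, pvToNat_ourMod]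
        rw [if_pos (pvRedSpec_lt _)]
        rw [if_neg (show ¬((-1 : Int) ≠ -1) by norm_num)]
        show pvPopNull (pvBitsSpec (pvRedSpec (n ^^^ (pvM <<< (pvBL n - 192)))))
          = pvBitsSpec (pvRedSpec n)
        rw [pvPopNull_bitsSpec, hred]

-- ---- masters
theorem mull_pol_spec_master (A B : List Int) :
    mull_pol A B = (if pvCl (pvToNat A) (pvToNat B) = 0 then []
                    else pvBitsSpec (pvRedSpec (pvCl (pvToNat A) (pvToNat B)))) := by
  unfold mull_pol
  try dsimp only
  have hlenAB : (pvEqualLength A B).1.length = (pvEqualLength A B).2.length := by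
    rw [pvEqualLength_fst_len, pvEqualLength_snd_len]
  have hr0e : pvE01 (List.replicate (2 * (pvEqualLength A B).1.length) (0 : Int)) :=
    pvE01_replicate _
  have hlen : 0 + (pvEqualLength A B).1.length + (pvEqualLength A B).2.length
      ≤ (List.replicate (2 * (pvEqualLength A B).1.length) (0 : Int)).length + 1 := by
    simp only [List.length_replicate]
    omega
  obtain ⟨h1, h2⟩ := pvOuter_eq (pvEqualLength A B).1 (pvEqualLength A B).2
    (List.replicate (2 * (pvEqualLength A B).1.length) (0 : Int)) 0 hr0e hlen
  have hrtn : pvToNat ((((pvEqualLength A B).1).zipIdx).foldl (fun res ai =>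
      if ai.1 = 0 then res
      else (((pvEqualLength A B).2).zipIdx).foldl (fun res bj =>
        if bj.1 = 0 then res
        else res.set (ai.2 + bj.2) ((res.getD (ai.2 + bj.2) 0 + ai.1 * bj.1).emod 2)) res)
        (List.replicate (2 * (pvEqualLength A B).1.length) (0 : Int)))
      = pvCl (pvToNat A) (pvToNat B) := by
    rw [h1, pvToNat_replicate_zero, Nat.zero_xor, Nat.shiftLeft_zero]
    rw [pvEqualLength_fst_toNat, pvEqualLength_snd_toNat]
  exact pvModPol_eq (pvCl (pvToNat A) (pvToNat B)) _ _ h2 hrtn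
    (by have := pvPnAux_length_le ((((pvEqualLength A B).1).zipIdx).foldl (fun res ai =>
          if ai.1 = 0 then res
          else (((pvEqualLength A B).2).zipIdx).foldl (fun res bj =>
            if bj.1 = 0 then res
            else res.set (ai.2 + bj.2) ((res.getD (ai.2 + bj.2) 0 + ai.1 * bj.1).emod 2)) res)
            (List.replicate (2 * (pvEqualLength A B).1.length) (0 : Int)))
        omega)

theorem mull_pol_alt_master (A B : List Int) :
    mull_pol_alt A B = (if pvCl (pvToNat A) (pvToNat B) = 0 then []
                        else pvBitsSpec (pvRedSpec (pvCl (pvToNat A) (pvToNat B)))) := by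
  unfold mull_pol_alt
  simp only [pvPack_eq A 0 0 (by norm_num), pvPack_eq B 0 0 (by norm_num),
    pow_zero, one_mul, Nat.zero_add]
  simp only [pvClmulLoop_eq (pvToNat A) 0 (pvToNat B) (pvToNat A) le_rfl, Nat.zero_xor]
  by_cases hcl : pvCl (pvToNat A) (pvToNat B) = 0
  · rw [if_pos hcl, if_pos hcl]
  · rw [if_neg hcl, if_neg hcl]
    simp only [pvRedLoop_eq (pvCl (pvToNat A) (pvToNat B)) (pvCl (pvToNat A) (pvToNat B)) le_rfl]
    simp only [pvBitsLoop_eq (pvRedSpec (pvCl (pvToNat A) (pvToNat B)))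
      (pvRedSpec (pvCl (pvToNat A) (pvToNat B))) le_rfl]
    by_cases h0 : pvRedSpec (pvCl (pvToNat A) (pvToNat B)) = 0
    · rw [if_pos h0, h0, pvBitsSpec_zero_eq]
    · rw [if_neg h0]
      have h3 := pvBitsSpec_ne_nil (pvRedSpec (pvCl (pvToNat A) (pvToNat B)))
      cases h4 : pvBitsSpec (pvRedSpec (pvCl (pvToNat A) (pvToNat B))) with
      | nil => exact absurd h4 h3
      | cons b bs => rfl

-- ===== VERDICT (by name: the statement is the Claim_ definition above) =====
theorem mull_pol_spec : Claim_equal_mull_pol := by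
  intro A B _
  show mull_pol A B = mull_pol_alt A B
  rw [mull_pol_spec_master, mull_pol_alt_master]
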